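-- pv_equiv track=rewrite | github.com/Arxivus/Hockey-project | main_app/players_functions.py | splitByRole
-- ===== SOURCE A (Python) =====
-- def splitByRole(pl_list):
--     forwards, defenders, goalkeepers  = [], [], []
--     for pl in pl_list:
--         match pl['role']:
--             case 'forward': forwards.append(pl)
--             case 'defender': defenders.append(pl)
--             case 'goalkeeper': goalkeepers.append(pl)
--
--     return forwards, defenders, goalkeepers
-- ===== SOURCE B (Python) =====
-- def splitByRole(pl_list):
--     forwards = [pl for pl in pl_list if pl['role'] == 'forward']
--     defenders = [pl for pl in pl_list if pl['role'] == 'defender']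
--     goalkeepers = [pl for pl in pl_list if pl['role'] == 'goalkeeper']
--     return forwards, defenders, goalkeepers
-- ===== Notes on version B (the rewrite author's own statement) =====
-- stated objective: idiomatic
-- what changed: Replaces the single match-statement loop with mutable accumulators by three independent filtering list comprehensions, one per role, each scanning the input once.
import Mathlib
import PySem

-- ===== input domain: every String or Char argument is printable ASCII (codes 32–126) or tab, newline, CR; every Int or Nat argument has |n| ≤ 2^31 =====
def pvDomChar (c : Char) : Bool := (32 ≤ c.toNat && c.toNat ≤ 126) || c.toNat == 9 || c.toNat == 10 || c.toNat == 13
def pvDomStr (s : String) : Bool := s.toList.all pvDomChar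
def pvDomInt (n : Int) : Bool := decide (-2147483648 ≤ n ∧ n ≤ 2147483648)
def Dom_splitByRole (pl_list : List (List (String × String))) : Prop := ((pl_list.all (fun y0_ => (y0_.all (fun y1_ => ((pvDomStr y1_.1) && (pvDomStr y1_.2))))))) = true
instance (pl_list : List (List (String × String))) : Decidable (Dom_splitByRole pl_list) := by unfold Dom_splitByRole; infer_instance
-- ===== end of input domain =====

-- B splits the list with three per-role filtering comprehensions instead of A's single
-- match-loop with three mutable accumulators (idiomatic; same return value).

-- shared dict-access primitive: pl['role'] as first-match association-list lookup
-- (exact for inputs where the key is present; Pre_ excludes the KeyError case)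
def pvRole (pl : List (String × String)) : String :=
  ((pl.find? (fun kv => kv.1 == "role")).map (fun kv => kv.2)).getD ""

-- ===== PORT A =====
-- the loop body: the match statement appending to one of the three accumulators
def pvStepA (acc : (List (List (String × String))) × (List (List (String × String))) × (List (List (String × String)))) (pl : List (String × String)) : (List (List (String × String))) × (List (List (String × String))) × (List (List (String × String))) :=
  let r := pvRole pl
  if r == "forward" then (acc.1 ++ [pl], acc.2.1, acc.2.2)
  else if r == "defender" then (acc.1, acc.2.1 ++ [pl], acc.2.2)
  else if r == "goalkeeper" then (acc.1, acc.2.1, acc.2.2 ++ [pl])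
  else acc

def splitByRole (pl_list : List (List (String × String))) : (List (List (String × String))) × (List (List (String × String))) × (List (List (String × String))) :=
  pl_list.foldl pvStepA ([], [], [])

-- ===== PORT B =====
def splitByRole_alt (pl_list : List (List (String × String))) : (List (List (String × String))) × (List (List (String × String))) × (List (List (String × String))) :=
  (pl_list.filter (fun pl => pvRole pl == "forward"),
   pl_list.filter (fun pl => pvRole pl == "defender"),
   pl_list.filter (fun pl => pvRole pl == "goalkeeper"))

-- ===== PRECONDITION & SPEC =====
-- Pre_ excludes exactly the inputs where some player dict lacks the 'role' key,
-- on which both Pythons raise KeyError.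
def Pre_splitByRole (pl_list : List (List (String × String))) : Prop :=
  (pl_list.all (fun pl => pl.any (fun kv => kv.1 == "role"))) = true
instance (pl_list : List (List (String × String))) : Decidable (Pre_splitByRole pl_list) := by unfold Pre_splitByRole; infer_instance
def pvWitness_splitByRole : (List (List (String × String))) :=
  [[("role", "forward"), ("name", "Ann")], [("role", "coach")], [("role", "goalkeeper")]]

def Spec_splitByRole (pl_list : List (List (String × String))) (out : (List (List (String × String))) × (List (List (String × String))) × (List (List (String × String)))) : Prop := out = splitByRole_alt pl_list
instance (pl_list : List (List (String × String))) (out : (List (List (String × String))) × (List (List (String × String))) × (List (List (String × String)))) : Decidable (Spec_splitByRole pl_list out) := by unfold Spec_splitByRole; infer_instance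

-- ===== CLAIM (what is proved, stated in full; the proofs are below) =====
def Claim_equal_splitByRole : Prop := ∀ (pl_list : List (List (String × String))), Dom_splitByRole pl_list → Pre_splitByRole pl_list → Spec_splitByRole pl_list (splitByRole pl_list)

-- ===== LEMMAS AND PROOFS =====

theorem splitByRole_foldl_inv (l : List (List (String × String)))
    (f d g : List (List (String × String))) :
    l.foldl pvStepA (f, d, g)
    = (f ++ l.filter (fun pl => pvRole pl == "forward"),
       d ++ l.filter (fun pl => pvRole pl == "defender"),
       g ++ l.filter (fun pl => pvRole pl == "goalkeeper")) := by
  induction l generalizing f d g with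
  | nil => simp
  | cons pl t ih =>
    rw [List.foldl_cons]
    by_cases h1 : pvRole pl == "forward"
    · have hs : pvStepA (f, d, g) pl = (f ++ [pl], d, g) := by simp [pvStepA, h1]
      have e : pvRole pl = "forward" := by simpa using h1
      rw [hs, ih]
      simp [List.filter_cons, e]
    · by_cases h2 : pvRole pl == "defender"
      · have hs : pvStepA (f, d, g) pl = (f, d ++ [pl], g) := by simp [pvStepA, h1, h2]
        have e : pvRole pl = "defender" := by simpa using h2
        rw [hs, ih]
        simp [List.filter_cons, e]
      · by_cases h3 : pvRole pl == "goalkeeper"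
        · have hs : pvStepA (f, d, g) pl = (f, d, g ++ [pl]) := by simp [pvStepA, h1, h2, h3]
          have e : pvRole pl = "goalkeeper" := by simpa using h3
          rw [hs, ih]
          simp [List.filter_cons, e]
        · have hs : pvStepA (f, d, g) pl = (f, d, g) := by simp [pvStepA, h1, h2, h3]
          rw [hs, ih]
          simp [List.filter_cons, h1, h2, h3]

-- ===== VERDICT (by name: the statement is the Claim_ definition above) =====
theorem splitByRole_spec : Claim_equal_splitByRole := by
  intro pl_list _ _
  show splitByRole pl_list = splitByRole_alt pl_list
  unfold splitByRole splitByRole_alt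
  rw [splitByRole_foldl_inv]
  simp
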